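-- pv_equiv track=rewrite | github.com/Saba-soxa/Goa-homework | level 46/class/codewars.py | repeats
-- ===== SOURCE A (Python) =====
-- def repeats(s):
--     numbers = set()
--
--     for number in s:
--         if number in numbers:
--             numbers.remove(number)
--         else:
--             numbers.add(number)
--     return sum(numbers)
-- ===== SOURCE B (Python) =====
-- def repeats(s):
--     counts = {}
--     for number in s:
--         counts[number] = counts.get(number, 0) + 1
--     return sum(v for v, c in counts.items() if c % 2 == 1)
-- ===== Notes on version B (the rewrite author's own statement) =====
-- stated objective: idiomatic
-- what changed: Replaces the interleaved add/remove set toggle with two phases: build a full Counter of the list, then sum the keys whose count is odd.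
import Mathlib
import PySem

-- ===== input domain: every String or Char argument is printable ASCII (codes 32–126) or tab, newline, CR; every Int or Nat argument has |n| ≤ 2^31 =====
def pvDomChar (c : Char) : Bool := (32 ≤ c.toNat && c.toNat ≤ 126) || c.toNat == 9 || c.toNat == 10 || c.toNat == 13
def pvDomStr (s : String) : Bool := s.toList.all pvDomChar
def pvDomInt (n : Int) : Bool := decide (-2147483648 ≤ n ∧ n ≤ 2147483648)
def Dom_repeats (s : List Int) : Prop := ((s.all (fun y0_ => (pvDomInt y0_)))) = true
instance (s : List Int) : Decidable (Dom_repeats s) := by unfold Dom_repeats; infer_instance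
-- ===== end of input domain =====

-- B replaces the interleaved add/remove set toggle with two phases (count all, then sum the odd-count keys); objective: idiomatic, same cost.

-- ===== PORT A =====
-- toggle membership of `number` in the set `numbers` (the loop body of A)
def pvToggle (numbers : PySem.Set Int) (number : Int) : PySem.Set Int :=
  if PySem.Set.contains numbers number then
    (PySem.Set.remove? numbers number).getD numbers   -- remove cannot fail: guarded by the membership test
  else
    PySem.Set.add numbers number

def repeats (s : List Int) : Int :=
  (s.foldl pvToggle PySem.Set.empty).sum

-- ===== PORT B =====
def repeats_alt (s : List Int) : Int :=
  let counts := s.foldl (fun d number => d.insert number (d.getD number 0 + 1)) PySem.Dict.empty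
  (((counts.items).filter (fun p => PySem.Int.mod p.2 2 == 1)).map Prod.fst).sum

-- ===== PRECONDITION & SPEC =====
def Spec_repeats (s : List Int) (out : Int) : Prop := out = repeats_alt s
instance (s : List Int) (out : Int) : Decidable (Spec_repeats s out) := by unfold Spec_repeats; infer_instance

-- ===== CLAIM (what is proved, stated in full; the proofs are below) =====
def Claim_equal_repeats : Prop := ∀ (s : List Int), Dom_repeats s → Spec_repeats s (repeats s)

-- ===== LEMMAS AND PROOFS =====

-- one toggle step: membership flips exactly at `a`, and Nodup is preserved
lemma pvToggle_mem (acc : PySem.Set Int) (a : Int) (h : acc.Nodup) :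
    (pvToggle acc a).Nodup ∧ ∀ x, x ∈ pvToggle acc a ↔ (if x = a then a ∉ acc else x ∈ acc) := by
  unfold pvToggle
  by_cases hmem : a ∈ acc
  · rw [if_pos (by simpa [PySem.Set.contains_iff] using hmem),
      PySem.Set.remove?_of_mem hmem]
    refine ⟨PySem.Set.nodup_discard _ _ h, fun x => ?_⟩
    simp only [Option.getD_some, PySem.Set.mem_discard]
    by_cases hx : x = a <;> simp [hx, hmem]
  · rw [if_neg (by simpa [PySem.Set.contains_iff] using hmem)]
    refine ⟨PySem.Set.nodup_add _ _ h, fun x => ?_⟩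
    rw [PySem.Set.mem_add]
    by_cases hx : x = a <;> simp [hx, hmem]

-- the whole toggle loop: x ends up in the set iff its parity in l flips its presence in acc
lemma pvToggle_foldl (l : List Int) (acc : PySem.Set Int) (h : acc.Nodup) :
    (l.foldl pvToggle acc).Nodup ∧
      ∀ x, x ∈ l.foldl pvToggle acc ↔ (if l.count x % 2 = 1 then x ∉ acc else x ∈ acc) := by
  induction l generalizing acc with
  | nil => simpa using h
  | cons a l ih =>
    obtain ⟨h1, h2⟩ := pvToggle_mem acc a h
    obtain ⟨h3, h4⟩ := ih (pvToggle acc a) h1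
    refine ⟨h3, fun x => ?_⟩
    rw [List.foldl_cons] at *
    rw [h4 x, List.count_cons]
    have h2' := h2 x
    by_cases hx : x = a
    · subst hx
      simp only [] at h2' ⊢
      rcases Nat.mod_two_eq_zero_or_one (l.count x) with he | he
      · have h1' : (l.count x + 1) % 2 = 1 := by omega
        simp [he, h1', h2']
      · have h1' : ¬ ((l.count x + 1) % 2 = 1) := by omega
        simp [he, h1', h2']
    · simp only [if_neg hx] at h2'
      have hz : ¬ ((a == x) = true) := by simpa using fun hax => hx hax.symm
      rw [if_neg hz, Nat.add_zero]
      by_cases hc : l.count x % 2 = 1 <;> simp [hc, h2']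

-- characterisation of A's result list
lemma repeats_set_char (s : List Int) :
    (s.foldl pvToggle PySem.Set.empty).Nodup ∧
      ∀ x, x ∈ s.foldl pvToggle PySem.Set.empty ↔ s.count x % 2 = 1 := by
  obtain ⟨h1, h2⟩ := pvToggle_foldl s PySem.Set.empty List.nodup_nil
  refine ⟨h1, fun x => ?_⟩
  rw [h2 x]
  by_cases hp : s.count x % 2 = 1 <;> simp [hp, PySem.Set.empty]

-- Python's `c % 2 == 1` on a nonnegative count is Nat parity
lemma pvOddTest (c : Nat) : (PySem.Int.mod (c : Int) 2 == 1) = decide (c % 2 = 1) := by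
  have : PySem.Int.mod (c : Int) 2 = ((c % 2 : Nat) : Int) := by
    simp [PySem.Int.mod, Int.fmod_eq_emod]
  rw [this]
  by_cases h : c % 2 = 1 <;> simp [h] <;> omega

-- B's result list is the odd-count keys, in first-occurrence order
lemma repeats_alt_eq_filter (s : List Int) :
    repeats_alt s = ((PySem.Set.ofList s).filter (fun k => decide (s.count k % 2 = 1))).sum := by
  have hdef : repeats_alt s =
      ((((PySem.Dict.counter s).items).filter (fun p => PySem.Int.mod p.2 2 == 1)).map Prod.fst).sum := rfl
  rw [hdef, PySem.Dict.items_counter, List.filter_map, List.map_map]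
  simp only [Function.comp_def]
  rw [List.filter_congr (fun x _ => pvOddTest (List.count x s))]
  simp

-- ===== VERDICT (by name: the statement is the Claim_ definition above) =====
theorem repeats_spec : Claim_equal_repeats := by
  intro s _
  unfold Spec_repeats
  rw [repeats_alt_eq_filter]
  unfold repeats
  obtain ⟨h1, h2⟩ := repeats_set_char s
  refine List.Perm.sum_eq ?_
  rw [List.perm_ext_iff_of_nodup h1 (List.Nodup.filter _ (PySem.Set.nodup_ofList s))]
  intro x
  rw [h2 x, List.mem_filter, PySem.Set.mem_ofList]
  constructor
  · intro h
    refine ⟨?_, by simpa using h⟩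
    rcases Nat.eq_zero_or_pos (s.count x) with h0 | h0
    · omega
    · exact List.count_pos_iff.mp h0
  · intro ⟨_, h⟩; simpa using h
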